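-- pv_equiv track=rewrite | github.com/ARundle01/countdown-sim | countdown.py | is_word_in_chars
-- ===== SOURCE A (Python) =====
-- def is_word_in_chars(user_word: str, user_chars: str) -> bool:
--     """
--     Determine whether a given word is
--     contained within a given set of
--     characters.
--
--     This function determines how many
--     times a character occurs in a word
--     and compares it to how many times
--     it occurs in a given set of characters.
--     If the number of occurrences is equal or
--     if the occurrences in the word is less
--     than in the character set (but not equal
--     to zero) than that character must occur
--     in both and is an allowed character.
--     A True bool is appended to the
--     occurence_array. If the character occurs
--     more times in the word than in the set,
--     then it is not an allowed character and
--     a False bool is appended to the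
--     occurence_array. After each character in
--     the given word is iterated through, the
--     occurence_array is checked for any Falses.
--     If a False occurs, than the word given can
--     not be made up from the characters given.
--
--     Parameters
--     ----------
--     user_word : str
--         A word the user has inputted.
--     user_chars : str
--         The characters the user has access to.
--
--     Returns
--     -------
--     bool :
--         True if successful, False if not.
--
--     """
--
--     occurence_array = []
--
--     for char in user_word:
--
--         # iterates through each char in the word, counting
--         # occurences of each char in both the word and the
--         # characters available to player.
--
--         occurence_in_user_chars = user_chars.count(char)
--         occurence_in_user_word = user_word.count(char)
--
--         # if char occurs more in the available chars or occurs
--         # the same amount of times, True is placed into array.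
--
--         if occurence_in_user_chars >= occurence_in_user_word:
--             occurence_array.append(True)
--         else:
--             occurence_array.append(False)
--
--     # if a False is present in occurrence array, then a
--     # letter appears more times than allowed, or
--     # isn't in the available chars at all.
--
--     if False in occurence_array:
--         return False
--
--     else:
--         return True
-- ===== SOURCE B (Python) =====
-- def is_word_in_chars(user_word: str, user_chars: str) -> bool:
--     remaining = list(user_chars)
--     for char in user_word:
--         if char in remaining:
--             remaining.remove(char)
--         else:
--             return False
--     return True
-- ===== Notes on version B (the rewrite author's own statement) =====
-- stated objective: faster
-- what changed: Replaces A's per-character count-in-word vs count-in-chars tally (plus a collected boolean array scanned at the end) with a single early-exit pass that consumes one occurrence from a shrinking pool of the available letters.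
import Mathlib
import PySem

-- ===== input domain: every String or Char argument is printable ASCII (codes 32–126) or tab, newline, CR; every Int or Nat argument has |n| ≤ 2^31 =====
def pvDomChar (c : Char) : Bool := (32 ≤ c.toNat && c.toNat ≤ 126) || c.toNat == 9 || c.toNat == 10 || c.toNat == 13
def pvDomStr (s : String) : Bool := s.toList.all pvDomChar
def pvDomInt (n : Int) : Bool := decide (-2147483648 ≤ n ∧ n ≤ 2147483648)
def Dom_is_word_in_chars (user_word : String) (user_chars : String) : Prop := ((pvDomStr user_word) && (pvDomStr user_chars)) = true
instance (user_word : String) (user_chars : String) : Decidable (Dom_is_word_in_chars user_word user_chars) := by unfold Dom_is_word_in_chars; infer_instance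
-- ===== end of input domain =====

-- B replaces A's per-character count-and-compare tally with a single early-exit pass
-- consuming letters from a shrinking pool; measured faster in a timing run.


-- ===== PORT A =====
-- literal transliteration: build occurence_array by appending a Bool per character,
-- then return False iff False occurs in the array
def is_word_in_chars (user_word : String) (user_chars : String) : Bool :=
  let occurence_array : List Bool :=
    user_word.toList.foldl (fun acc char =>
      let occurence_in_user_chars := PySem.Str.count user_chars (String.singleton char)
      let occurence_in_user_word := PySem.Str.count user_word (String.singleton char)
      if occurence_in_user_chars ≥ occurence_in_user_word then
        acc ++ [true]
      else
        acc ++ [false]) []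
  if occurence_array.contains false then false else true

-- ===== PORT B =====
-- literal transliteration of Source B: walk the word, consuming one occurrence of each
-- letter from the remaining pool (remove? = none ↔ 'char in remaining' is false)
def is_word_in_chars_alt_go : List Char → List Char → Bool
  | [], _ => true
  | char :: rest, remaining =>
    match PySem.List.remove? remaining char with
    | some remaining' => is_word_in_chars_alt_go rest remaining'
    | none => false

def is_word_in_chars_alt (user_word : String) (user_chars : String) : Bool :=
  is_word_in_chars_alt_go user_word.toList user_chars.toList

-- ===== PRECONDITION & SPEC =====
def Spec_is_word_in_chars (user_word : String) (user_chars : String) (out : Bool) : Prop := out = is_word_in_chars_alt user_word user_chars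
instance (user_word : String) (user_chars : String) (out : Bool) : Decidable (Spec_is_word_in_chars user_word user_chars out) := by unfold Spec_is_word_in_chars; infer_instance

-- ===== CLAIM (what is proved, stated in full; the proofs are below) =====
def Claim_equal_is_word_in_chars : Prop := ∀ (user_word : String) (user_chars : String), Dom_is_word_in_chars user_word user_chars → Spec_is_word_in_chars user_word user_chars (is_word_in_chars user_word user_chars)

-- ===== LEMMAS AND PROOFS =====

-- Python s.count(c) for a single character c is the List.count of that character.
theorem count_go_single (c : Char) : ∀ (fuel : Nat) (l : List Char) (acc : Nat), l.length ≤ fuel →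
    PySem.Chars.count.go [c] fuel l acc = acc + l.count c := by
  intro fuel
  induction fuel with
  | zero =>
    intro l acc h
    cases l with
    | nil => simp [PySem.Chars.count.go]
    | cons x t => simp at h
  | succ n ih =>
    intro l acc h
    cases l with
    | nil => simp [PySem.Chars.count.go]
    | cons x t =>
      simp only [PySem.Chars.count.go]
      by_cases hc : c = x
      · subst hc
        simp [List.isPrefixOf, ih t (acc + 1) (by simpa using h)]
        omega
      · have hp : [c].isPrefixOf (x :: t) = false := by
          simp [List.isPrefixOf]
          intro hh
          exact hc hh
        simp [hp, Ne.symm hc, ih t acc (by simpa using h)]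

theorem count_singleton (s : List Char) (c : Char) : PySem.Chars.count s [c] = s.count c := by
  simp [PySem.Chars.count, count_go_single c s.length s 0 le_rfl]

theorem str_count_singleton (s : String) (c : Char) :
    PySem.Str.count s (String.singleton c) = s.toList.count c := by
  rw [PySem.Str.count_eq]
  simpa using count_singleton s.toList c

-- The consuming pass succeeds iff every character's multiplicity in the word
-- is at most its multiplicity in the pool.
theorem alt_go_eq_true_iff (l : List Char) : ∀ (pool : List Char),
    is_word_in_chars_alt_go l pool = true ↔ ∀ c : Char, l.count c ≤ pool.count c := by
  induction l with
  | nil => intro pool; simp [is_word_in_chars_alt_go]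
  | cons x t ih =>
    intro pool
    by_cases hx : x ∈ pool
    · rw [is_word_in_chars_alt_go, PySem.List.remove?_eq_some_erase _ _ hx]
      simp only [ih]
      have h1 : 1 ≤ pool.count x := List.one_le_count_iff.mpr hx
      constructor
      · intro h c
        have hc := h c
        have he : (pool.erase x).count c = pool.count c - (if x == c then 1 else 0) :=
          List.count_erase
        have hcc : (x :: t).count c = t.count c + (if x == c then 1 else 0) :=
          List.count_cons
        by_cases hcx : c = x
        · subst hcx; simp only [beq_self_eq_true, if_true] at he hcc; omega
        · simp only [beq_iff_eq, Ne.symm hcx, if_false] at he hcc; omega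
      · intro h c
        have hc := h c
        have he : (pool.erase x).count c = pool.count c - (if x == c then 1 else 0) :=
          List.count_erase
        have hcc : (x :: t).count c = t.count c + (if x == c then 1 else 0) :=
          List.count_cons
        by_cases hcx : c = x
        · subst hcx; simp only [beq_self_eq_true, if_true] at he hcc; omega
        · simp only [beq_iff_eq, Ne.symm hcx, if_false] at he hcc; omega
    · rw [is_word_in_chars_alt_go, (PySem.List.remove?_eq_none_iff _ _).mpr hx]
      simp only [Bool.false_eq_true, false_iff, not_forall, not_le]
      exact ⟨x, by simp [List.count_eq_zero_of_not_mem hx]⟩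

-- A's collected boolean array is the map of the per-character test over the word.
theorem occ_array_eq_map (w : List Char) (p : Char → Prop) [DecidablePred p] :
    w.foldl (fun acc c => if p c then acc ++ [true] else acc ++ [false]) [] =
      w.map (fun c => decide (p c)) := by
  have key : ∀ (l : List Char) (acc : List Bool),
      l.foldl (fun acc c => if p c then acc ++ [true] else acc ++ [false]) acc =
        acc ++ l.map (fun c => decide (p c)) := by
    intro l
    induction l with
    | nil => simp
    | cons x t ih =>
      intro acc
      by_cases hpx : p x <;> simp [List.foldl_cons, hpx, ih]
  simpa using key w []

theorem a_true_iff (w chars : String) :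
    is_word_in_chars w chars = true ↔
      ∀ c ∈ w.toList, w.toList.count c ≤ chars.toList.count c := by
  unfold is_word_in_chars
  simp only [str_count_singleton, ge_iff_le]
  rw [occ_array_eq_map w.toList (fun char => w.toList.count char ≤ chars.toList.count char)]
  constructor
  · intro h c hc
    by_contra hlt
    have : (false : Bool) ∈ w.toList.map
        (fun char => decide (w.toList.count char ≤ chars.toList.count char)) := by
      refine List.mem_map.mpr ⟨c, hc, ?_⟩
      simp [hlt]
    simp [this] at h
  · intro h
    have : ¬ (false : Bool) ∈ w.toList.map
        (fun char => decide (w.toList.count char ≤ chars.toList.count char)) := by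
      intro hmem
      rcases List.mem_map.mp hmem with ⟨c, hc, hf⟩
      rw [decide_eq_true (h c hc)] at hf
      cases hf
    simp [this]

theorem alt_true_iff (w chars : String) :
    is_word_in_chars_alt w chars = true ↔
      ∀ c ∈ w.toList, w.toList.count c ≤ chars.toList.count c := by
  unfold is_word_in_chars_alt
  rw [alt_go_eq_true_iff]
  constructor
  · intro h c _; exact h c
  · intro h c
    by_cases hc : c ∈ w.toList
    · exact h c hc
    · simp [List.count_eq_zero_of_not_mem hc]

-- ===== VERDICT (by name: the statement is the Claim_ definition above) =====
theorem is_word_in_chars_spec : Claim_equal_is_word_in_chars := by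
  intro w chars _
  unfold Spec_is_word_in_chars
  rcases hb : is_word_in_chars_alt w chars with _ | _
  · rcases ha : is_word_in_chars w chars with _ | _
    · rfl
    · exact absurd ((alt_true_iff w chars).mpr ((a_true_iff w chars).mp ha))
        (by simp [hb])
  · exact (a_true_iff w chars).mpr ((alt_true_iff w chars).mp hb)
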